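-- pv_equiv track=rewrite | github.com/nerstak/L1-Calculator | functions_alt.py | fill_list
-- ===== SOURCE A (Python) =====
-- def fill_list(operator,polynom): #plit the polynom into two lists, excluding the concerned operator. Used in evaluate()
--     leftPart=[]
--     rightPart=[]
--     for i in range(polynom.index((operator,'operator'))):
--         leftPart.append(polynom[i])
--     for i in range(polynom.index((operator,'operator'))+1,len(polynom)):
--         rightPart.append(polynom[i])
--     return leftPart,rightPart
-- ===== SOURCE B (Python) =====
-- def fill_list(operator, polynom):
--     # One linear pass with a 'seen' flag instead of two index() scans plus two copy loops.
--     leftPart = []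
--     rightPart = []
--     seen = False
--     for item in polynom:
--         if not seen and item == (operator, 'operator'):
--             seen = True
--         elif seen:
--             rightPart.append(item)
--         else:
--             leftPart.append(item)
--     if not seen:
--         raise ValueError(f"{(operator, 'operator')!r} is not in list")
--     return leftPart, rightPart
-- ===== Notes on version B (the rewrite author's own statement) =====
-- stated objective: faster
-- what changed: Replaced two list.index scans plus two index-based copy loops by a single pass over polynom with a 'seen' flag that partitions around the first (operator,'operator') element.
import Mathlib
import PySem

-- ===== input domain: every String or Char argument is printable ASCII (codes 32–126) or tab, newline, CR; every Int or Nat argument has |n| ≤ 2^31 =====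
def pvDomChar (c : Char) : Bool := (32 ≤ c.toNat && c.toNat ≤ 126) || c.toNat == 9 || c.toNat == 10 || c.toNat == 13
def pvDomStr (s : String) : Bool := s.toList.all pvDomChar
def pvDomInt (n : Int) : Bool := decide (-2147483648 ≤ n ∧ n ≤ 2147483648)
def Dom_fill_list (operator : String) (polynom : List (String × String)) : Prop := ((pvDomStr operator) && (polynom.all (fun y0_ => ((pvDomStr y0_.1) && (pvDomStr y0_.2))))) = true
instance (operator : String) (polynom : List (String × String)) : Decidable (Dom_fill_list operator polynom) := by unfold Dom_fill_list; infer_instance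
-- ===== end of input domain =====

-- B replaces A's two list.index scans plus two index-copy loops by one pass with a 'seen' flag.
-- Both raise ValueError when (operator,'operator') is absent; Pre_ excludes exactly that.

-- ===== PORT A =====
-- literal transliteration of A: index() twice, then two range loops reading polynom[i]
def fill_list (operator : String) (polynom : List (String × String)) : (List (String × String)) × (List (String × String)) :=
  match PySem.List.index? polynom (operator, "operator") with
  | none => ([], [])   -- Python raises ValueError here; excluded by Pre_fill_list
  | some idx =>
    let leftPart := (PySem.List.pyRange 0 (idx : Int) 1).foldl
      (fun acc i => acc ++ [PySem.List.pyGetD polynom i ("", "")]) []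
    let rightPart := (PySem.List.pyRange ((idx : Int) + 1) (polynom.length : Int) 1).foldl
      (fun acc i => acc ++ [PySem.List.pyGetD polynom i ("", "")]) []
    (leftPart, rightPart)

-- ===== PORT B =====
-- B's loop body: state = (seen, leftPart, rightPart)
def pvStep (t : String × String)
    (st : Bool × List (String × String) × List (String × String))
    (item : String × String) : Bool × List (String × String) × List (String × String) :=
  if !st.1 && item == t then (true, st.2.1, st.2.2)
  else if st.1 then (st.1, st.2.1, st.2.2 ++ [item])
  else (st.1, st.2.1 ++ [item], st.2.2)

def fill_list_alt (operator : String) (polynom : List (String × String)) : (List (String × String)) × (List (String × String)) :=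
  let s := polynom.foldl (pvStep (operator, "operator")) (false, [], [])
  -- if s.1 = false Python raises ValueError; excluded by Pre_fill_list
  (s.2.1, s.2.2)

-- ===== PRECONDITION & SPEC =====
-- Pre_ excludes exactly the inputs where (operator,'operator') is absent: both A and B raise ValueError there.
def Pre_fill_list (operator : String) (polynom : List (String × String)) : Prop :=
  (operator, "operator") ∈ polynom
instance (operator : String) (polynom : List (String × String)) : Decidable (Pre_fill_list operator polynom) := by unfold Pre_fill_list; infer_instance
def pvWitness_fill_list : String × (List (String × String)) :=
  ("+", [("1", "number"), ("+", "operator"), ("2", "number")])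

def Spec_fill_list (operator : String) (polynom : List (String × String)) (out : (List (String × String)) × (List (String × String))) : Prop := out = fill_list_alt operator polynom
instance (operator : String) (polynom : List (String × String)) (out : (List (String × String)) × (List (String × String))) : Decidable (Spec_fill_list operator polynom out) := by unfold Spec_fill_list; infer_instance

-- ===== CLAIM (what is proved, stated in full; the proofs are below) =====
def Claim_equal_fill_list : Prop := ∀ (operator : String) (polynom : List (String × String)), Dom_fill_list operator polynom → Pre_fill_list operator polynom → Spec_fill_list operator polynom (fill_list operator polynom)

-- ===== LEMMAS AND PROOFS =====

-- A's left loop: appending polynom[i] for i in range(n) yields take n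
lemma pv_left_take (xs : List (String × String)) (n : Nat) (hn : n ≤ xs.length) :
    (PySem.List.pyRange 0 (n : Int) 1).map (fun i => PySem.List.pyGetD xs i ("", "")) = xs.take n := by
  induction n with
  | zero => simp [PySem.List.pyRange_one_eq_nil]
  | succ m ih =>
    have h1 : ((m : Int) : Int) ≤ (m : Int) := le_refl _
    have hcast : ((m + 1 : Nat) : Int) = (m : Int) + 1 := by push_cast; ring
    rw [hcast, PySem.List.pyRange_one_succ_right (by exact_mod_cast Nat.zero_le m)]
    rw [List.map_append, ih (Nat.le_of_succ_le hn)]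
    have hm : m < xs.length := hn
    have : PySem.List.pyGetD xs (m : Int) ("", "") = xs[m] := by
      simp [PySem.List.pyGetD, PySem.List.pyGet?, PySem.List.pyIdx?, hm]
    simp only [List.map_cons, List.map_nil]
    rw [this, List.take_add_one, List.getElem?_eq_getElem hm]
    simp

-- B's loop before seeing the target: accumulates on the left, seen stays false
lemma pv_fold_false (t : String × String) (pre : List (String × String)) (l r : List (String × String))
    (h : t ∉ pre) :
    pre.foldl (pvStep t) (false, l, r) = (false, l ++ pre, r) := by
  induction pre generalizing l with
  | nil => simp
  | cons x xs ih =>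
    have hx : ¬(x == t) = true := by
      simp only [beq_iff_eq]
      intro he; exact h (he ▸ List.mem_cons_self)
    simp only [List.foldl_cons, pvStep]
    rw [if_neg (by simp [hx]), if_neg (by simp)]
    rw [ih _ (fun hm => h (List.mem_cons_of_mem _ hm))]
    simp

-- B's loop after seeing the target: accumulates on the right
lemma pv_fold_true (t : String × String) (suf : List (String × String)) (l r : List (String × String)) :
    suf.foldl (pvStep t) (true, l, r) = (true, l, r ++ suf) := by
  induction suf generalizing r with
  | nil => simp
  | cons x xs ih =>
    simp only [List.foldl_cons, pvStep]
    rw [if_neg (by simp), if_pos (by simp)]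
    rw [ih]
    simp

-- ===== VERDICT (by name: the statement is the Claim_ definition above) =====
theorem fill_list_spec : Claim_equal_fill_list := by
  intro operator polynom _ hpre
  unfold Spec_fill_list
  set t : String × String := (operator, "operator") with ht
  have hsome : (PySem.List.index? polynom t).isSome := (PySem.List.index?_isSome_iff polynom t).mpr hpre
  obtain ⟨idx, hidx⟩ := Option.isSome_iff_exists.mp hsome
  obtain ⟨pre, suf, hdec, hlen, hnot⟩ := (PySem.List.index?_eq_some_iff polynom t idx).mp hidx
  -- A's value
  have hA : fill_list operator polynom = (pre, suf) := by
    unfold fill_list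
    rw [← ht, hidx]
    simp only [Prod.mk.injEq]
    constructor
    · -- left part
      rw [PySem.List.foldl_append_singleton_eq_map,
          pv_left_take polynom idx (by rw [hdec, ← hlen]; simp),
          hdec, ← hlen]
      simp
    · -- right part
      rw [PySem.List.foldl_pyRange_pyGetD' polynom ("", "") (fun acc x => acc ++ [x]) [] (by positivity : (0:Int) ≤ (idx : Int) + 1)]
      rw [PySem.List.foldl_append_singleton_eq_self]
      have : (((idx : Int) + 1)).toNat = idx + 1 := by omega
      rw [this, hdec, ← hlen]
      simp
  -- B's value
  have hB : fill_list_alt operator polynom = (pre, suf) := by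
    unfold fill_list_alt
    rw [← ht, hdec, List.foldl_append, pv_fold_false t pre [] [] hnot]
    simp only [List.foldl_cons, pvStep]
    rw [if_pos (by simp), pv_fold_true]
    simp
  rw [hA, hB]
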